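-- pv_equiv track=rewrite | github.com/alisaalisaalisaalisas/LLM_SuperCLI | llm_supercli/llm_supercli/command_system/parser.py | split_command_chain
-- ===== SOURCE A (Python) =====
-- from typing import List, Optional, Tuple
--
-- def split_command_chain(text: str) -> List[str]:
--     """
--     Split a command chain (commands separated by &&).
--
--     Args:
--         text: Input text potentially containing multiple commands
--
--     Returns:
--         List of individual commands
--     """
--     commands = []
--     current = []
--     depth = 0
--
--     for char in text:
--         if char == '(' or char == '[' or char == '{':
--             depth += 1
--             current.append(char)
--         elif char == ')' or char == ']' or char == '}':
--             depth -= 1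
--             current.append(char)
--         elif char == '&' and depth == 0:
--             if current and current[-1] == '&':
--                 current.pop()
--                 if current:
--                     commands.append(''.join(current).strip())
--                 current = []
--             else:
--                 current.append(char)
--         else:
--             current.append(char)
--
--     if current:
--         commands.append(''.join(current).strip())
--
--     return [cmd for cmd in commands if cmd]
-- ===== SOURCE B (Python) =====
-- def split_command_chain(text):
--     """Two-phase split: scan indices for top-level '&&' boundaries, then slice."""
--     n = len(text)
--     bounds = []
--     depth = 0
--     i = 0
--     while i < n:
--         if depth == 0 and text[i:i+2] == '&&':
--             bounds.append(i)
--             i += 2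
--             continue
--         c = text[i]
--         if c in '([{':
--             depth += 1
--         elif c in ')]}':
--             depth -= 1
--         i += 1
--     parts = []
--     start = 0
--     for b in bounds:
--         parts.append(text[start:b])
--         start = b + 2
--     parts.append(text[start:])
--     return [s for s in (p.strip() for p in parts) if s]
-- ===== Notes on version B (the rewrite author's own statement) =====
-- stated objective: alternative
-- what changed: Replaces A's single pass that accumulates a character buffer and pops a pending ampersand when the separator completes by a two-phase algorithm: an index scan with two-character lookahead that only records the positions of top-level double-ampersand separators, then a separate pass that slices the original string between consecutive boundaries, strips, and drops empty pieces.
import Mathlib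
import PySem

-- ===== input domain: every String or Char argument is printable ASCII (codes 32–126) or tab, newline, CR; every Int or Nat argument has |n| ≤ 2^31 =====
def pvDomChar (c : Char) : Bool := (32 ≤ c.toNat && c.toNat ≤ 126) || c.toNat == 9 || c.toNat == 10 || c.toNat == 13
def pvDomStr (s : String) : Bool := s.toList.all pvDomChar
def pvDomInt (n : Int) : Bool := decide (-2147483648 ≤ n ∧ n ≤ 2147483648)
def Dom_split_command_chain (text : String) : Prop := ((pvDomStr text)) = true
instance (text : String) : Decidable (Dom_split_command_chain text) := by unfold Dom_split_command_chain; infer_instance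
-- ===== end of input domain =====

-- B replaces A's buffer-and-pop single pass by a two-phase algorithm (boundary index scan with
-- lookahead, then slicing); objective: alternative decomposition, same cost.

-- ===== PORT A =====
-- the for-loop of A, one char at a time over (commands, current, depth)
def aLoop : List String → List Char → Int → List Char → List String × List Char × Int
  | commands, current, depth, [] => (commands, current, depth)
  | commands, current, depth, c :: rest =>
    if c = '(' ∨ c = '[' ∨ c = '{' then
      aLoop commands (current ++ [c]) (depth + 1) rest
    else if c = ')' ∨ c = ']' ∨ c = '}' then
      aLoop commands (current ++ [c]) (depth - 1) rest
    else if c = '&' ∧ depth = 0 then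
      if current.getLast? = some '&' then      -- "current and current[-1] == '&'"
        if current.dropLast ≠ [] then          -- current.pop(); "if current:"
          aLoop (commands ++ [PySem.Str.strip (String.ofList current.dropLast)]) [] depth rest
        else
          aLoop commands [] depth rest
      else
        aLoop commands (current ++ [c]) depth rest
    else
      aLoop commands (current ++ [c]) depth rest

def split_command_chain (text : String) : List String :=
  let s := aLoop [] [] 0 text.toList
  let commands := if s.2.1 ≠ [] then s.1 ++ [PySem.Str.strip (String.ofList s.2.1)] else s.1
  commands.filter (fun cmd => cmd ≠ "")

-- ===== PORT B =====
-- phase 1: the while-loop, recording boundary indices of top-level '&&'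
def altScan : List Char → Nat → Int → List Nat
  | [], _, _ => []
  | c :: rest, i, depth =>
    if depth = 0 ∧ c = '&' ∧ rest.head? = some '&' then    -- text[i:i+2] == '&&'
      i :: altScan rest.tail (i + 2) depth
    else
      let d' := if c = '(' ∨ c = '[' ∨ c = '{' then depth + 1
                else if c = ')' ∨ c = ']' ∨ c = '}' then depth - 1
                else depth
      altScan rest (i + 1) d'
  termination_by cs _ _ => cs.length
  decreasing_by all_goals (simp [List.length_tail]; try omega)

-- phase 2: slicing between consecutive boundaries
def altParts (cs : List Char) (bounds : List Nat) (start : Nat) : List (List Char) :=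
  match bounds with
  | [] => [cs.drop start]
  | b :: bs => ((cs.drop start).take (b - start)) :: altParts cs bs (b + 2)

def split_command_chain_alt (text : String) : List String :=
  let cs := text.toList
  let parts := altParts cs (altScan cs 0 0) 0
  (parts.map (fun p => PySem.Str.strip (String.ofList p))).filter (fun s => s ≠ "")

-- ===== PRECONDITION & SPEC =====
def Spec_split_command_chain (text : String) (out : List String) : Prop := out = split_command_chain_alt text
instance (text : String) (out : List String) : Decidable (Spec_split_command_chain text out) := by unfold Spec_split_command_chain; infer_instance

-- ===== CLAIM (what is proved, stated in full; the proofs are below) =====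
def Claim_equal_split_command_chain : Prop := ∀ (text : String), Dom_split_command_chain text → Spec_split_command_chain text (split_command_chain text)

-- ===== LEMMAS AND PROOFS =====

-- common specification: the list of raw top-level segments of the char list
def glueL (cur : List Char) : List (List Char) → List (List Char)
  | [] => [cur]
  | s :: t => (cur ++ s) :: t

def segs : List Char → Int → List (List Char)
  | [], _ => [[]]
  | c :: rest, depth =>
    if depth = 0 ∧ c = '&' ∧ rest.head? = some '&' then
      [] :: segs rest.tail depth
    else
      let d' := if c = '(' ∨ c = '[' ∨ c = '{' then depth + 1
                else if c = ')' ∨ c = ']' ∨ c = '}' then depth - 1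
                else depth
      glueL [c] (segs rest d')
  termination_by cs _ => cs.length
  decreasing_by all_goals (simp [List.length_tail]; try omega)

theorem glueL_glueL (a b : List Char) (ss : List (List Char)) :
    glueL a (glueL b ss) = glueL (a ++ b) ss := by
  cases ss <;> simp [glueL]

theorem glueL_ne_nil (cur : List Char) (ss : List (List Char)) : glueL cur ss ≠ [] := by
  cases ss <;> simp [glueL]

theorem strip_empty : PySem.Str.strip "" = "" := by decide

def finishA (s : List String × List Char × Int) : List String :=
  (if s.2.1 ≠ [] then s.1 ++ [PySem.Str.strip (String.ofList s.2.1)] else s.1).filter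
    (fun cmd => cmd ≠ "")

theorem segs_ne_nil (cs : List Char) (d : Int) : segs cs d ≠ [] := by
  cases cs with
  | nil => simp [segs]
  | cons c rest =>
    rw [segs]
    split
    · simp
    · exact glueL_ne_nil _ _

-- A-side invariant proof
theorem aLoop_eq (n : Nat) : ∀ (rest : List Char), rest.length ≤ n →
    ∀ (commands : List String) (current : List Char) (depth : Int),
    (depth = 0 → current.getLast? ≠ some '&') →
    finishA (aLoop commands current depth rest) =
      commands.filter (fun cmd => cmd ≠ "") ++
      ((glueL current (segs rest depth)).map (fun p => PySem.Str.strip (String.ofList p))).filter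
        (fun s => s ≠ "") := by
  induction n with
  | zero =>
    intro rest hlen commands current depth _
    have : rest = [] := by cases rest <;> simp at hlen ⊢
    subst this
    by_cases hc : current = []
    · subst hc; simp [aLoop, finishA, segs, glueL, strip_empty]
    · simp [aLoop, finishA, segs, glueL, hc, List.filter_append]
  | succ n ih =>
    intro rest hlen commands current depth hinv
    cases rest with
    | nil =>
      by_cases hc : current = []
      · subst hc; simp [aLoop, finishA, segs, glueL, strip_empty]
      · simp [aLoop, finishA, segs, glueL, hc, List.filter_append]
    | cons c rest' =>
      by_cases hopen : c = '(' ∨ c = '[' ∨ c = '{'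
      · -- opening bracket
        rw [aLoop, if_pos hopen, segs]
        have hne : ¬ (depth = 0 ∧ c = '&' ∧ rest'.head? = some '&') := by
          rcases hopen with h | h | h <;> simp [h]
        rw [if_neg hne]
        have hd' : (if c = '(' ∨ c = '[' ∨ c = '{' then depth + 1
                else if c = ')' ∨ c = ']' ∨ c = '}' then depth - 1
                else depth) = depth + 1 := by rw [if_pos hopen]
        rw [hd']
        rw [ih rest' (by simpa using Nat.le_of_succ_le_succ hlen) commands (current ++ [c]) (depth + 1)
          (by intro _ hlast; simp at hlast; rcases hopen with h | h | h <;> simp [h] at hlast)]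
        rw [glueL_glueL]
      · by_cases hclose : c = ')' ∨ c = ']' ∨ c = '}'
        · -- closing bracket
          rw [aLoop, if_neg hopen, if_pos hclose, segs]
          have hne : ¬ (depth = 0 ∧ c = '&' ∧ rest'.head? = some '&') := by
            rcases hclose with h | h | h <;> simp [h]
          rw [if_neg hne]
          have hd' : (if c = '(' ∨ c = '[' ∨ c = '{' then depth + 1
                  else if c = ')' ∨ c = ']' ∨ c = '}' then depth - 1
                  else depth) = depth - 1 := by rw [if_neg hopen, if_pos hclose]
          rw [hd']
          rw [ih rest' (by simpa using Nat.le_of_succ_le_succ hlen) commands (current ++ [c]) (depth - 1)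
            (by intro _ hlast; simp at hlast; rcases hclose with h | h | h <;> simp [h] at hlast)]
          rw [glueL_glueL]
        · by_cases hamp : c = '&' ∧ depth = 0
          · -- '&' at depth 0
            obtain ⟨hc, hd⟩ := hamp; subst hc; subst hd
            have hlast : current.getLast? ≠ some '&' := hinv rfl
            cases rest' with
            | nil =>
              -- trailing single '&'
              rw [aLoop, if_neg hopen, if_neg hclose,
                if_pos (show '&' = '&' ∧ (0:Int) = 0 from ⟨rfl, rfl⟩), if_neg hlast]
              rw [segs, if_neg (show ¬((0:Int) = 0 ∧ '&' = '&' ∧ ([] : List Char).head? = some '&')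
                by simp)]
              simp [aLoop, finishA, segs, glueL, List.filter_append]
            | cons c2 rest'' =>
              by_cases h2amp : c2 = '&'
              · -- '&&' boundary: consume two chars
                subst h2amp
                rw [aLoop, if_neg hopen, if_neg hclose,
                  if_pos (show '&' = '&' ∧ (0:Int) = 0 from ⟨rfl, rfl⟩), if_neg hlast]
                rw [aLoop, if_neg hopen, if_neg hclose,
                  if_pos (show '&' = '&' ∧ (0:Int) = 0 from ⟨rfl, rfl⟩),
                  if_pos (show (current ++ ['&']).getLast? = some '&' by simp)]
                rw [segs, if_pos (show (0:Int) = 0 ∧ '&' = '&' ∧ ('&' :: rest'').head? = some '&'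
                  from ⟨rfl, rfl, rfl⟩)]
                simp only [List.dropLast_concat]
                have hlen' : rest''.length ≤ n := by simp at hlen; omega
                by_cases hc : current = []
                · subst hc
                  rw [if_neg (show ¬(([] : List Char) ≠ []) by simp)]
                  rw [ih rest'' hlen' commands [] 0 (by simp)]
                  obtain ⟨s, t, hs⟩ := List.exists_cons_of_ne_nil (segs_ne_nil rest'' 0)
                  simp [glueL, hs, strip_empty, List.tail]
                · rw [if_pos hc]  -- current ≠ []
                  rw [ih rest'' hlen' (commands ++ [PySem.Str.strip (String.ofList current)]) [] 0
                    (by simp)]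
                  obtain ⟨s, t, hs⟩ := List.exists_cons_of_ne_nil (segs_ne_nil rest'' 0)
                  simp [glueL, hs, List.tail]
                  rw [← List.filter_append]
                  simp
              · -- '&' then non-'&': consume two chars, second by subcases
                rw [aLoop, if_neg hopen, if_neg hclose,
                  if_pos (show '&' = '&' ∧ (0:Int) = 0 from ⟨rfl, rfl⟩), if_neg hlast]
                rw [segs, if_neg (show ¬((0:Int) = 0 ∧ '&' = '&' ∧ (c2 :: rest'').head? = some '&')
                  by simp [h2amp])]
                have hd1 : (if '&' = '(' ∨ '&' = '[' ∨ '&' = '{' then (0:Int) + 1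
                        else if '&' = ')' ∨ '&' = ']' ∨ '&' = '}' then 0 - 1
                        else 0) = 0 := by decide
                rw [hd1]
                simp only [glueL_glueL]
                rw [segs]
                have hne2 : ¬ ((0:Int) = 0 ∧ c2 = '&' ∧ rest''.head? = some '&') := by
                  simp [h2amp]
                rw [if_neg hne2]
                have hlen'' : rest''.length ≤ n := by simp at hlen; omega
                by_cases h2open : c2 = '(' ∨ c2 = '[' ∨ c2 = '{'
                · rw [aLoop, if_pos h2open]
                  have hd2 : (if c2 = '(' ∨ c2 = '[' ∨ c2 = '{' then (0:Int) + 1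
                          else if c2 = ')' ∨ c2 = ']' ∨ c2 = '}' then 0 - 1
                          else 0) = 0 + 1 := by rw [if_pos h2open]
                  rw [hd2]
                  rw [ih rest'' hlen'' commands ((current ++ ['&']) ++ [c2]) (0 + 1)
                    (by intro _ hl; simp at hl; rcases h2open with h | h | h <;> simp [h] at hl)]
                  simp [glueL_glueL]
                · by_cases h2close : c2 = ')' ∨ c2 = ']' ∨ c2 = '}'
                  · rw [aLoop, if_neg h2open, if_pos h2close]
                    have hd2 : (if c2 = '(' ∨ c2 = '[' ∨ c2 = '{' then (0:Int) + 1
                            else if c2 = ')' ∨ c2 = ']' ∨ c2 = '}' then 0 - 1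
                            else 0) = 0 - 1 := by rw [if_neg h2open, if_pos h2close]
                    rw [hd2]
                    rw [ih rest'' hlen'' commands ((current ++ ['&']) ++ [c2]) (0 - 1)
                      (by intro _ hl; simp at hl; rcases h2close with h | h | h <;> simp [h] at hl)]
                    simp [glueL_glueL]
                  · rw [aLoop, if_neg h2open, if_neg h2close,
                      if_neg (show ¬(c2 = '&' ∧ (0:Int) = 0) by simp [h2amp])]
                    have hd2 : (if c2 = '(' ∨ c2 = '[' ∨ c2 = '{' then (0:Int) + 1
                            else if c2 = ')' ∨ c2 = ']' ∨ c2 = '}' then 0 - 1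
                            else 0) = 0 := by rw [if_neg h2open, if_neg h2close]
                    rw [hd2]
                    rw [ih rest'' hlen'' commands ((current ++ ['&']) ++ [c2]) 0
                      (by intro _ hl; simp [h2amp] at hl)]
                    simp [glueL_glueL]
          · -- plain char (incl. '&' at nonzero depth)
            rw [aLoop, if_neg hopen, if_neg hclose, if_neg hamp]
            rw [segs]
            have hne2 : ¬ (depth = 0 ∧ c = '&' ∧ rest'.head? = some '&') := by
              intro ⟨h1, h2, _⟩; exact hamp ⟨h2, h1⟩
            rw [if_neg hne2]
            have hd' : (if c = '(' ∨ c = '[' ∨ c = '{' then depth + 1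
                    else if c = ')' ∨ c = ']' ∨ c = '}' then depth - 1
                    else depth) = depth := by rw [if_neg hopen, if_neg hclose]
            rw [hd']
            rw [ih rest' (by simpa using Nat.le_of_succ_le_succ hlen) commands (current ++ [c]) depth
              (by intro hd0 hlast; simp at hlast; exact hamp ⟨hlast, hd0⟩)]
            rw [glueL_glueL]

theorem altScan_ge (n : Nat) : ∀ (rest : List Char), rest.length ≤ n →
    ∀ (i : Nat) (d : Int) (b : Nat), b ∈ altScan rest i d → i ≤ b := by
  induction n with
  | zero =>
    intro rest hlen i d b hb
    have : rest = [] := by cases rest <;> simp at hlen ⊢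
    subst this; simp [altScan] at hb
  | succ n ih =>
    intro rest hlen i d b hb
    cases rest with
    | nil => simp [altScan] at hb
    | cons c rest' =>
      rw [altScan] at hb
      split at hb
      · rcases List.mem_cons.mp hb with h | h
        · omega
        · have := ih rest'.tail (by simp [List.length_tail] at hlen ⊢; omega) (i + 2) d b h
          omega
      · have := ih rest' (by simpa using Nat.le_of_succ_le_succ hlen) (i + 1) _ b hb
        omega

theorem altParts_shift (cs : List Char) (bounds : List Nat) (i : Nat) (c : Char)
    (rest : List Char) (hdrop : cs.drop i = c :: rest) (hge : ∀ b ∈ bounds, i + 1 ≤ b) :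
    altParts cs bounds i = glueL [c] (altParts cs bounds (i + 1)) := by
  have hdrop1 : cs.drop (i + 1) = rest := by
    rw [← List.tail_drop, hdrop]; rfl
  cases bounds with
  | nil => simp [altParts, glueL, hdrop, hdrop1]
  | cons b bs =>
    have hb : i + 1 ≤ b := hge b (List.mem_cons_self ..)
    have htake : (cs.drop i).take (b - i) = c :: (cs.drop (i + 1)).take (b - (i + 1)) := by
      rw [hdrop, hdrop1, show b - i = (b - (i + 1)) + 1 by omega, List.take_succ_cons]
    simp [altParts, glueL, htake]

theorem altParts_eq (n : Nat) : ∀ (rest : List Char), rest.length ≤ n →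
    ∀ (cs : List Char) (i : Nat) (d : Int), cs.drop i = rest →
    altParts cs (altScan rest i d) i = segs rest d := by
  induction n with
  | zero =>
    intro rest hlen cs i d hdrop
    have : rest = [] := by cases rest <;> simp at hlen ⊢
    subst this; simp [altScan, altParts, segs, hdrop]
  | succ n ih =>
    intro rest hlen cs i d hdrop
    cases rest with
    | nil => simp [altScan, altParts, segs, hdrop]
    | cons c rest' =>
      have hdrop1 : cs.drop (i + 1) = rest' := by
        rw [← List.tail_drop, hdrop]; rfl
      rw [altScan, segs]
      split
      · -- '&&' boundary
        have hdrop2 : cs.drop (i + 2) = rest'.tail := by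
          rw [← List.tail_drop, hdrop1]
        rw [altParts]
        rw [ih rest'.tail (by simp [List.length_tail] at hlen ⊢; omega) cs (i + 2) d hdrop2]
        simp
      · -- ordinary char
        rw [altParts_shift cs _ i c rest' hdrop
            (fun b hb => altScan_ge rest'.length rest' le_rfl (i + 1) _ b hb)]
        rw [ih rest' (by simpa using Nat.le_of_succ_le_succ hlen) cs (i + 1) _ hdrop1]

-- ===== VERDICT (by name: the statement is the Claim_ definition above) =====
theorem split_command_chain_spec : Claim_equal_split_command_chain := by
  intro text _
  unfold Spec_split_command_chain
  show finishA (aLoop [] [] 0 text.toList) = split_command_chain_alt text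
  rw [aLoop_eq text.toList.length text.toList le_rfl [] [] 0 (by simp)]
  simp only [split_command_chain_alt]
  rw [altParts_eq text.toList.length text.toList le_rfl text.toList 0 0 (by simp)]
  obtain ⟨s, t, hs⟩ := List.exists_cons_of_ne_nil (segs_ne_nil text.toList 0)
  simp [hs, glueL]
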